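-- pv_equiv track=rewrite | github.com/Venue6603/ANTAgent | AntAgent/autodev/diff_doctor.py | _reject_append_without_remove_random_animal
-- ===== SOURCE A (Python) =====
-- def _reject_append_without_remove_random_animal(diff_text: str) -> tuple[bool, str]:
--     """
--     If a hunk *adds* a line that matches '^# Random animal:' it must also *remove*
--     a line that matches '^# Random animal:' in the SAME hunk. This blocks diffs
--     that merely append a second comment instead of replacing the original.
--     """
--     in_hunk = False
--     minus_has_ra = False
--     plus_has_ra = False
--
--     def flush_check():
--         if plus_has_ra and not minus_has_ra:
--             return (False, "Rejecting diff: Random-animal comment was added without removing the original (append-only).")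
--         return (True, "")
--
--     for ln in diff_text.splitlines():
--         if ln.startswith("@@"):
--             # New hunk: check the last one, then reset
--             ok, why = flush_check()
--             if not ok:
--                 return ok, why
--             in_hunk = True
--             minus_has_ra = False
--             plus_has_ra = False
--             continue
--         if not in_hunk:
--             continue
--         if ln.startswith("-") and ln[1:].lstrip().startswith("# Random animal:"):
--             minus_has_ra = True
--         elif ln.startswith("+") and ln[1:].lstrip().startswith("# Random animal:"):
--             plus_has_ra = True
--
--     # final hunk
--     ok, why = flush_check()
--     if not ok:
--         return ok, why
--     return (True, "")
-- ===== SOURCE B (Python) =====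
-- def _reject_append_without_remove_random_animal(diff_text: str) -> tuple[bool, str]:
--     """Group the diff into hunks first, then validate each hunk (two-phase)."""
--     # Phase 1: group lines into hunk bodies; everything before the first '@@' is dropped.
--     hunks = []
--     cur = None
--     for ln in diff_text.splitlines():
--         if ln.startswith("@@"):
--             if cur is not None:
--                 hunks.append(cur)
--             cur = []
--         elif cur is not None:
--             cur.append(ln)
--     if cur is not None:
--         hunks.append(cur)
--
--     # Phase 2: reject on the first hunk that adds the comment without removing one.
--     def is_ra(ln, sign):
--         return ln.startswith(sign) and ln[1:].lstrip().startswith("# Random animal:")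
--
--     for body in hunks:
--         if any(is_ra(ln, "+") for ln in body) and not any(is_ra(ln, "-") for ln in body):
--             return (False, "Rejecting diff: Random-animal comment was added without removing the original (append-only).")
--     return (True, "")
-- ===== Notes on version B (the rewrite author's own statement) =====
-- stated objective: alternative
-- what changed: Replaced the interleaved single-pass state machine (in_hunk/minus/plus flags with a flush at each header and at EOF) by a two-phase structure: first group the lines into hunk bodies, then scan the hunks in order and reject on the first hunk whose body adds the random-animal comment without removing one.
import Mathlib
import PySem

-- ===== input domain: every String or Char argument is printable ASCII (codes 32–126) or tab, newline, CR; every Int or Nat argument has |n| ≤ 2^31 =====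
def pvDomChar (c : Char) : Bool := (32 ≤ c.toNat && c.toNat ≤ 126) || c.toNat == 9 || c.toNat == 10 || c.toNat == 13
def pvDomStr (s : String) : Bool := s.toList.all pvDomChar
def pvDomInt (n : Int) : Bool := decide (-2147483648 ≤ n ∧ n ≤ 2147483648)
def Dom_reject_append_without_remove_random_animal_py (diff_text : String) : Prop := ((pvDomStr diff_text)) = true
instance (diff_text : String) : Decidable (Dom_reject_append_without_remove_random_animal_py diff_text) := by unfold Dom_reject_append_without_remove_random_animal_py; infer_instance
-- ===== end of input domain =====

-- B replaces A's interleaved single-pass state machine by a two-phase structure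
-- (group the lines into hunk bodies, then scan the hunks); same cost, alternative decomposition.

-- shared line predicates (both Pythons test lines the same way)
def pvMsg : String := "Rejecting diff: Random-animal comment was added without removing the original (append-only)."

def pvIsHeader (ln : List Char) : Bool := PySem.Chars.startswith ln ['@', '@']

-- ln[1:].lstrip().startswith("# Random animal:")
def pvRATail (ln : List Char) : Bool :=
  PySem.Chars.startswith (PySem.Chars.lstrip (PySem.Chars.slice ln (some 1) none)) "# Random animal:".toList

def pvIsRA (sign : Char) (ln : List Char) : Bool :=
  PySem.Chars.startswith ln [sign] && pvRATail ln

-- ===== PORT A =====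
-- flush_check()
def pvFlush (minus_has_ra plus_has_ra : Bool) : Bool × String :=
  if plus_has_ra && !minus_has_ra then (false, pvMsg) else (true, "")

-- the for-loop over splitlines with state (in_hunk, minus_has_ra, plus_has_ra); early return
def pvALoop : List (List Char) → Bool → Bool → Bool → Bool × String
  | [], _, minus, plus =>
      -- final hunk: flush, return its rejection if any, else (True, "")
      let r := pvFlush minus plus
      if !r.1 then r else (true, "")
  | ln :: rest, in_hunk, minus, plus =>
      if pvIsHeader ln then
        let r := pvFlush minus plus
        if !r.1 then r else pvALoop rest true false false
      else if !in_hunk then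
        pvALoop rest in_hunk minus plus
      else if pvIsRA '-' ln then
        pvALoop rest in_hunk true plus
      else if pvIsRA '+' ln then
        pvALoop rest in_hunk minus true
      else
        pvALoop rest in_hunk minus plus

def reject_append_without_remove_random_animal_py (diff_text : String) : Bool × String :=
  pvALoop ((PySem.Str.splitlines diff_text).map String.toList) false false false

-- ===== PORT B =====
-- phase 1: group lines into hunk bodies (cur = None before the first header)
def pvGroup : List (List Char) → Option (List (List Char)) → List (List (List Char)) → List (List (List Char))
  | [], none, hunks => hunks
  | [], some cur, hunks => hunks ++ [cur]
  | ln :: rest, cur, hunks =>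
      if pvIsHeader ln then
        pvGroup rest (some []) (match cur with | none => hunks | some c => hunks ++ [c])
      else
        match cur with
        | none => pvGroup rest none hunks
        | some c => pvGroup rest (some (c ++ [ln])) hunks

-- phase 2: first offending hunk body decides
def pvBadHunk (body : List (List Char)) : Bool :=
  body.any (pvIsRA '+') && !(body.any (pvIsRA '-'))

def pvCheck : List (List (List Char)) → Bool × String
  | [] => (true, "")
  | body :: rest => if pvBadHunk body then (false, pvMsg) else pvCheck rest

def reject_append_without_remove_random_animal_py_alt (diff_text : String) : Bool × String :=
  pvCheck (pvGroup ((PySem.Str.splitlines diff_text).map String.toList) none [])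

-- ===== PRECONDITION & SPEC =====
def Spec_reject_append_without_remove_random_animal_py (diff_text : String) (out : Bool × String) : Prop := out = reject_append_without_remove_random_animal_py_alt diff_text
instance (diff_text : String) (out : Bool × String) : Decidable (Spec_reject_append_without_remove_random_animal_py diff_text out) := by unfold Spec_reject_append_without_remove_random_animal_py; infer_instance

-- ===== CLAIM (what is proved, stated in full; the proofs are below) =====
def Claim_equal_reject_append_without_remove_random_animal_py : Prop := ∀ (diff_text : String), Dom_reject_append_without_remove_random_animal_py diff_text → Spec_reject_append_without_remove_random_animal_py diff_text (reject_append_without_remove_random_animal_py diff_text)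

-- ===== LEMMAS AND PROOFS =====

-- a line starting with one sign does not start with the other
theorem pvIsRA_excl {a b : Char} (hab : a ≠ b) (ln : List Char)
    (h : pvIsRA a ln = true) : pvIsRA b ln = false := by
  cases ln with
  | nil => simp [pvIsRA, PySem.Chars.startswith_iff]
  | cons c cs =>
      simp only [pvIsRA, Bool.and_eq_true, PySem.Chars.startswith_iff] at h
      obtain ⟨h1, -⟩ := h
      obtain ⟨rfl, -⟩ := List.cons_prefix_cons.mp h1
      simp [pvIsRA, PySem.Chars.startswith_iff, List.cons_prefix_cons, (Ne.symm hab)]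

-- unfolding lemmas for A's loop (flush inlined) and B's checker
theorem pvALoop_nil (ih m p : Bool) :
    pvALoop [] ih m p = if p && !m then (false, pvMsg) else (true, "") := by
  by_cases h : (p && !m) = true <;> simp [pvALoop, pvFlush, h]

theorem pvALoop_header {ln : List Char} (hh : pvIsHeader ln = true)
    (rest : List (List Char)) (ih m p : Bool) :
    pvALoop (ln :: rest) ih m p
      = if p && !m then (false, pvMsg) else pvALoop rest true false false := by
  by_cases h : (p && !m) = true <;> simp [pvALoop, pvFlush, hh, h]

theorem pvCheck_cons (b : List (List Char)) (t : List (List (List Char))) :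
    pvCheck (b :: t) = if pvBadHunk b then (false, pvMsg) else pvCheck t := rfl

-- accumulator of pvGroup is a prefix of the result
theorem pvGroup_append (lines : List (List Char)) :
    ∀ (cur : Option (List (List Char))) (hunks : List (List (List Char))),
      pvGroup lines cur hunks = hunks ++ pvGroup lines cur [] := by
  induction lines with
  | nil => intro cur hunks; cases cur <;> simp [pvGroup]
  | cons ln rest ih =>
      intro cur hunks
      cases cur with
      | none =>
          by_cases h : pvIsHeader ln = true
          · simp [pvGroup, h, ih (some []) hunks]
          · simp [pvGroup, h, ih none hunks]
      | some c =>
          by_cases h : pvIsHeader ln = true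
          · simp [pvGroup, h, ih (some []) (hunks ++ [c]), ih (some []) [c]]
          · simp [pvGroup, h, ih (some (c ++ [ln])) hunks]

-- flags of A's state machine = any-scans of the current hunk body
def pvMFlag : Option (List (List Char)) → Bool
  | none => false
  | some b => b.any (pvIsRA '-')

def pvPFlag : Option (List (List Char)) → Bool
  | none => false
  | some b => b.any (pvIsRA '+')

theorem pvKey (lines : List (List Char)) :
    ∀ (cur : Option (List (List Char))),
      pvALoop lines cur.isSome (pvMFlag cur) (pvPFlag cur) = pvCheck (pvGroup lines cur []) := by
  induction lines with
  | nil =>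
      intro cur
      cases cur with
      | none => rfl
      | some b =>
          rw [show pvGroup [] (some b) [] = [b] from rfl, pvCheck_cons]
          rw [show pvMFlag (some b) = b.any (pvIsRA '-') from rfl,
              show pvPFlag (some b) = b.any (pvIsRA '+') from rfl,
              show (some b).isSome = true from rfl, pvALoop_nil]
          rfl
  | cons ln rest ih =>
      intro cur
      by_cases hh : pvIsHeader ln = true
      · have hg0 := ih (some [])
        simp only [pvMFlag, pvPFlag, Option.isSome_some, List.any_nil] at hg0
        cases cur with
        | none =>
            rw [show pvGroup (ln :: rest) none [] = pvGroup rest (some []) [] by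
                  simp [pvGroup, hh]]
            rw [show pvMFlag (none : Option (List (List Char))) = false from rfl,
                show pvPFlag (none : Option (List (List Char))) = false from rfl,
                show (none : Option (List (List Char))).isSome = false from rfl,
                pvALoop_header hh]
            simpa using hg0
        | some b =>
            rw [show pvMFlag (some b) = b.any (pvIsRA '-') from rfl,
                show pvPFlag (some b) = b.any (pvIsRA '+') from rfl,
                show (some b).isSome = true from rfl,
                pvALoop_header hh]
            rw [show pvGroup (ln :: rest) (some b) [] = pvGroup rest (some []) [b] by
                  simp [pvGroup, hh]]
            rw [pvGroup_append rest (some []) [b], List.singleton_append, pvCheck_cons]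
            rw [show pvBadHunk b = (b.any (pvIsRA '+') && !b.any (pvIsRA '-')) from rfl]
            by_cases h : (b.any (pvIsRA '+') && !b.any (pvIsRA '-')) = true
            · simp [h]
            · simp [h, hg0]
      · cases cur with
        | none =>
            have key := ih none
            rw [show pvGroup (ln :: rest) none [] = pvGroup rest none [] by
                  simp [pvGroup, hh]]
            rw [show pvALoop (ln :: rest) (none : Option (List (List Char))).isSome
                  (pvMFlag none) (pvPFlag none)
                  = pvALoop rest false false false by
                  simp [pvALoop, pvMFlag, pvPFlag, hh]]
            exact key
        | some b =>
            have key := ih (some (b ++ [ln]))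
            simp only [pvMFlag, pvPFlag, Option.isSome_some, List.any_append, List.any_cons,
              List.any_nil, Bool.or_false] at key
            rw [show pvGroup (ln :: rest) (some b) [] = pvGroup rest (some (b ++ [ln])) [] by
                  simp [pvGroup, hh]]
            rw [show pvMFlag (some b) = b.any (pvIsRA '-') from rfl,
                show pvPFlag (some b) = b.any (pvIsRA '+') from rfl,
                show (some b).isSome = true from rfl]
            by_cases hm : pvIsRA '-' ln = true
            · have hp : pvIsRA '+' ln = false := pvIsRA_excl (by decide) ln hm
              rw [show pvALoop (ln :: rest) true (b.any (pvIsRA '-')) (b.any (pvIsRA '+'))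
                    = pvALoop rest true true (b.any (pvIsRA '+')) by
                    simp [pvALoop, hh, hm]]
              simpa [hm, hp] using key
            · by_cases hp : pvIsRA '+' ln = true
              · rw [show pvALoop (ln :: rest) true (b.any (pvIsRA '-')) (b.any (pvIsRA '+'))
                      = pvALoop rest true (b.any (pvIsRA '-')) true by
                      simp [pvALoop, hh, hm, hp]]
                simpa [hm, hp] using key
              · rw [show pvALoop (ln :: rest) true (b.any (pvIsRA '-')) (b.any (pvIsRA '+'))
                      = pvALoop rest true (b.any (pvIsRA '-')) (b.any (pvIsRA '+')) by
                      simp [pvALoop, hh, hm, hp]]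
                simpa [hm, hp] using key

-- ===== VERDICT (by name: the statement is the Claim_ definition above) =====
theorem reject_append_without_remove_random_animal_py_spec : Claim_equal_reject_append_without_remove_random_animal_py := by
  intro diff_text _
  unfold Spec_reject_append_without_remove_random_animal_py
  unfold reject_append_without_remove_random_animal_py reject_append_without_remove_random_animal_py_alt
  have := pvKey ((PySem.Str.splitlines diff_text).map String.toList) none
  simpa [pvMFlag, pvPFlag] using this
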